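-- pv_equiv track=rewrite | github.com/RyuuseiX/Studio4 | project/Auto_Tag.py | find_hierarchy
-- ===== SOURCE A (Python) =====
-- def find_hierarchy(word_list, word_dict):
--     tag_list = []
--
--     # 1 token
--     for word in word_list:
--         found_new_tag = True
--         running_word = word
--         while found_new_tag:
--             found_new_tag = False
--             for key in word_dict:
--                 if running_word in word_dict[key]:
--                     found_new_tag = True
--                     tag_list.append(running_word)
--                     if running_word == key:
--                         found_new_tag = False
--                     running_word = key
--                     break
--
--     # 2 tokens
--     for i in range(len(word_list)-1):
--         word = word_list[i]+word_list[i+1]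
--         found_new_tag = True
--         running_word = word
--         while found_new_tag:
--             found_new_tag = False
--             for key in word_dict:
--                 if running_word in word_dict[key]:
--                     found_new_tag = True
--                     tag_list.append(running_word)
--                     if running_word == key:
--                         found_new_tag = False
--                     running_word = key
--                     break
--
--     # 3 tokens
--     for i in range(len(word_list) - 2):
--         word = word_list[i] + word_list[i + 1] + word_list[i+2]
--         found_new_tag = True
--         running_word = word
--         while found_new_tag:
--             found_new_tag = False
--             for key in word_dict:
--                 if running_word in word_dict[key]:
--                     found_new_tag = True
--                     tag_list.append(running_word)
--                     if running_word == key: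
--                         found_new_tag = False
--                     running_word = key
--                     break
--
--     return tag_list
-- ===== SOURCE B (Python) =====
-- def find_hierarchy(word_list, word_dict):
--     # Reverse index: value word -> first key whose value list contains it,
--     # built once; each climb step is then a single dict lookup.
--     parent = {}
--     for key, values in word_dict.items():
--         for v in values:
--             if v not in parent:
--                 parent[v] = key
--     seeds = (list(word_list)
--              + [a + b for a, b in zip(word_list, word_list[1:])]
--              + [a + b + c for a, b, c in zip(word_list, word_list[1:], word_list[2:])])
--     tag_list = []
--     for w in seeds:
--         while w in parent:
--             tag_list.append(w)
--             p = parent[w]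
--             if p == w:
--                 break
--             w = p
--     return tag_list
-- ===== Notes on version B (the rewrite author's own statement) =====
-- stated objective: faster
-- what changed: B precomputes a reverse index (value word -> first containing key) once and builds the 1/2/3-token seeds with zips, so each climb step is one dict lookup instead of a scan over every key's value list.
import Mathlib
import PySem

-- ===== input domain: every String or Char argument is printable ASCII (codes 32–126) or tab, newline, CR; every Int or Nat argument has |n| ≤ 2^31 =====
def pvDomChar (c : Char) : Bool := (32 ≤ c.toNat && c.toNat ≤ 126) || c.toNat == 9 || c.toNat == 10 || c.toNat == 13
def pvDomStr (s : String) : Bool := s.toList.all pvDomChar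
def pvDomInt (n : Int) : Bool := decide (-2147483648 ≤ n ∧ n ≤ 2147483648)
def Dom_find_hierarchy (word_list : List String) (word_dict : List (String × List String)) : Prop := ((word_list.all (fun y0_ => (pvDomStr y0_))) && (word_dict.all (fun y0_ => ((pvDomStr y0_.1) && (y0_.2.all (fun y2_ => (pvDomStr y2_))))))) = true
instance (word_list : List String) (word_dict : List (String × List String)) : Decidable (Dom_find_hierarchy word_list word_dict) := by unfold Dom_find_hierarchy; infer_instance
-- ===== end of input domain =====

-- B replaces A's per-step scan over every key's value list by a reverse index
-- (value word -> first containing key) built once, so each climb step is one lookup (objective: faster).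
-- The while-loops of both Pythons diverge when the child->parent map has a cycle; Pre_ excludes that,
-- and the ports totalize the loop with fuel word_dict.length + 2, which suffices under Pre_.

-- ===== PORT A =====
-- word_dict[key]: dict lookup (first match); key is always a key of the dict, so the [] default is never read
def lookupA (wd : List (String × List String)) (k : String) : List String :=
  ((wd.find? (fun kv => kv.1 == k)).map (·.2)).getD []

-- the inner 'for key in word_dict: if running_word in word_dict[key]: … break'
def findKeyA (full : List (String × List String)) : List (String × List String) → String → Option String
  | [], _ => none
  | kv :: rest, w => if (lookupA full kv.1).contains w then some kv.1 else findKeyA full rest w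

-- the 'while found_new_tag' loop, totalized with fuel (the Python diverges outside Pre_)
def climbA (wd : List (String × List String)) : Nat → String → List String → List String
  | 0, _, acc => acc
  | n+1, w, acc =>
    match findKeyA wd wd w with
    | none => acc
    | some k => if w == k then acc ++ [w] else climbA wd n k (acc ++ [w])

def find_hierarchy (word_list : List String) (word_dict : List (String × List String)) : List String :=
  let fuel := word_dict.length + 2
  let t1 := word_list.foldl (fun acc w => climbA word_dict fuel w acc) []
  let t2 := (PySem.List.pyRange 0 ((word_list.length : Int) - 1) 1).foldl
      (fun acc i => climbA word_dict fuel
        (PySem.List.pyGetD word_list i "" ++ PySem.List.pyGetD word_list (i+1) "") acc) t1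
  (PySem.List.pyRange 0 ((word_list.length : Int) - 2) 1).foldl
      (fun acc i => climbA word_dict fuel
        (PySem.List.pyGetD word_list i "" ++ PySem.List.pyGetD word_list (i+1) ""
          ++ PySem.List.pyGetD word_list (i+2) "") acc) t2

-- ===== PORT B =====
-- reverse index: value word -> first key whose value list contains it
def buildParent (wd : List (String × List String)) : PySem.Dict String String :=
  wd.foldl (fun d kv => kv.2.foldl (fun d v => if d.contains v then d else d.insert v kv.1) d)
    PySem.Dict.empty

-- B's while-loop, one dict lookup per step; same fuel totalization as A's port
def climbB (parent : PySem.Dict String String) : Nat → String → List String → List String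
  | 0, _, acc => acc
  | n+1, w, acc =>
    match parent.get? w with
    | none => acc
    | some p => if p == w then acc ++ [w] else climbB parent n p (acc ++ [w])

def find_hierarchy_alt (word_list : List String) (word_dict : List (String × List String)) : List String :=
  let parent := buildParent word_dict
  let seeds := word_list
    ++ ((word_list.zip (PySem.List.slice word_list (some 1) none)).map (fun p => p.1 ++ p.2))
    ++ (((word_list.zip (PySem.List.slice word_list (some 1) none)).zip
          (PySem.List.slice word_list (some 2) none)).map (fun p => p.1.1 ++ p.1.2 ++ p.2))
  seeds.foldl (fun acc w => climbB parent (word_dict.length + 2) w acc) []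

-- ===== PRECONDITION & SPEC =====
-- first key whose value list contains w (the child -> parent map of the hierarchy)
def pvFirstKey (wd : List (String × List String)) (w : String) : Option String :=
  (wd.find? (fun kv => kv.2.contains w)).map (·.1)

-- one climb step of the child->parent map (none once the chain has stopped: no parent, or a self-parent)
def pvStep (wd : List (String × List String)) : Option String → Option String
  | none => none
  | some w =>
    match pvFirstKey wd w with
    | none => none
    | some k => if k == w then none else some k

-- Pre_ excludes (a) association lists with duplicate keys, which cannot arise from a Python dict,
-- and (b) inputs whose child->parent map has a cycle among the keys, on which A's while loop diverges
-- (acyclic = every key's parent chain dies out within #keys + 1 steps).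
def Pre_find_hierarchy (word_list : List String) (word_dict : List (String × List String)) : Prop :=
  (word_dict.map Prod.fst).Nodup ∧
    ∀ kv ∈ word_dict, (pvStep word_dict)^[word_dict.length + 1] (some kv.1) = none
instance (word_list : List String) (word_dict : List (String × List String)) : Decidable (Pre_find_hierarchy word_list word_dict) := by unfold Pre_find_hierarchy; infer_instance

def pvWitness_find_hierarchy : List String × (List (String × List String)) :=
  (["dog", "cat"], [("pet", ["dog", "cat"]), ("animal", ["pet"])])

def Spec_find_hierarchy (word_list : List String) (word_dict : List (String × List String)) (out : List String) : Prop := out = find_hierarchy_alt word_list word_dict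
instance (word_list : List String) (word_dict : List (String × List String)) (out : List String) : Decidable (Spec_find_hierarchy word_list word_dict out) := by unfold Spec_find_hierarchy; infer_instance

-- ===== CLAIM (what is proved, stated in full; the proofs are below) =====
def Claim_equal_find_hierarchy : Prop := ∀ (word_list : List String) (word_dict : List (String × List String)), Dom_find_hierarchy word_list word_dict → Pre_find_hierarchy word_list word_dict → Spec_find_hierarchy word_list word_dict (find_hierarchy word_list word_dict)

-- ===== LEMMAS AND PROOFS =====

theorem find?_key_self (wd : List (String × List String))
    (h : (wd.map Prod.fst).Nodup) (kv : String × List String) (hm : kv ∈ wd) :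
    wd.find? (fun p => p.1 == kv.1) = some kv := by
  induction wd with
  | nil => cases hm
  | cons hd tl ih =>
    simp only [List.map_cons, List.nodup_cons] at h
    rcases List.mem_cons.mp hm with rfl | hm'
    · simp [List.find?]
    · have hne : hd.1 ≠ kv.1 := by
        intro he
        exact h.1 (he ▸ List.mem_map.mpr ⟨kv, hm', rfl⟩)
      simp [List.find?, beq_eq_false_iff_ne.mpr hne, ih h.2 hm']

theorem lookupA_self (wd : List (String × List String))
    (h : (wd.map Prod.fst).Nodup) (kv : String × List String) (hm : kv ∈ wd) :
    lookupA wd kv.1 = kv.2 := by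
  simp [lookupA, find?_key_self wd h kv hm]

theorem findKeyA_eq_firstKey (full : List (String × List String)) (l : List (String × List String))
    (hl : ∀ kv ∈ l, lookupA full kv.1 = kv.2) (w : String) :
    findKeyA full l w = pvFirstKey l w := by
  induction l with
  | nil => rfl
  | cons hd tl ih =>
    have hhd := hl hd (List.mem_cons_self ..)
    simp only [findKeyA, pvFirstKey, List.find?, hhd]
    by_cases hc : w ∈ hd.2
    · simp [hc]
    · simp [hc, ih (fun kv hm => hl kv (List.mem_cons_of_mem _ hm)), pvFirstKey]

theorem get?_addVals (k : String) (vs : List String) (d : PySem.Dict String String) (w : String) :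
    (vs.foldl (fun d v => if d.contains v then d else d.insert v k) d).get? w
      = (d.get? w).or (if vs.contains w then some k else none) := by
  induction vs generalizing d with
  | nil => simp
  | cons v vs ih =>
    simp only [List.foldl_cons, ih]
    by_cases hvw : w = v
    · subst hvw
      by_cases hc : d.contains w = true
      · have : (d.get? w).isSome := by rw [← PySem.Dict.contains_eq_isSome_get?]; exact hc
        rcases Option.isSome_iff_exists.mp this with ⟨x, hx⟩
        simp [hc, hx]
      · simp only [Bool.not_eq_true] at hc
        have hnone : d.get? w = none := by
          rw [PySem.Dict.get?_eq_none_iff_contains]; exact hc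
        simp [hc, hnone, PySem.Dict.get?_insert_self]
    · by_cases hc : d.contains v = true
      · simp [hc, hvw]
      · simp only [Bool.not_eq_true] at hc
        simp [hc, PySem.Dict.get?_insert_of_ne _ _ hvw, hvw]

theorem get?_buildParent_aux (wd : List (String × List String)) (d : PySem.Dict String String)
    (w : String) :
    (wd.foldl (fun d kv => kv.2.foldl (fun d v => if d.contains v then d else d.insert v kv.1) d) d).get? w
      = (d.get? w).or (pvFirstKey wd w) := by
  induction wd generalizing d with
  | nil => simp [pvFirstKey]
  | cons hd tl ih =>
    simp only [List.foldl_cons, ih, get?_addVals]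
    simp only [pvFirstKey, List.find?]
    by_cases hc : w ∈ hd.2
    · simp [hc]
    · simp [hc]

theorem get?_buildParent (wd : List (String × List String)) (w : String) :
    (buildParent wd).get? w = pvFirstKey wd w := by
  simp [buildParent, get?_buildParent_aux, PySem.Dict.get?_empty]

theorem step_eq (wd : List (String × List String)) (h : (wd.map Prod.fst).Nodup) (w : String) :
    findKeyA wd wd w = (buildParent wd).get? w := by
  rw [get?_buildParent, findKeyA_eq_firstKey wd wd (fun kv hm => lookupA_self wd h kv hm)]

theorem climb_eq (wd : List (String × List String)) (h : (wd.map Prod.fst).Nodup) :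
    ∀ (n : Nat) (w : String) (acc : List String),
      climbA wd n w acc = climbB (buildParent wd) n w acc := by
  intro n
  induction n with
  | zero => intro w acc; rfl
  | succ n ih =>
    intro w acc
    simp only [climbA, climbB, ← step_eq wd h]
    cases hf : findKeyA wd wd w with
    | none => rfl
    | some k =>
      by_cases hwk : w = k
      · subst hwk; simp
      · have h1 : (w == k) = false := beq_eq_false_iff_ne.mpr hwk
        have h2 : (k == w) = false := beq_eq_false_iff_ne.mpr (Ne.symm hwk)
        simp [h1, h2, ih]

theorem pair_seeds (wl : List String) :
    (PySem.List.pyRange 0 ((wl.length : Int) - 1) 1).map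
        (fun i => PySem.List.pyGetD wl i "" ++ PySem.List.pyGetD wl (i+1) "")
      = (wl.zip wl.tail).map (fun p => p.1 ++ p.2) := by
  rw [PySem.List.pyRange_one]
  apply List.ext_getElem
  · simp [List.length_zip]
  · intro i h1 h2
    have hi : i < wl.length - 1 := by
      simp at h1; omega
    simp only [List.getElem_map, List.getElem_zip, List.getElem_range]
    rw [show (0 : Int) + (i : Int) = ((i : Nat) : Int) by ring,
      show ((i : Nat) : Int) + 1 = (((i + 1 : Nat)) : Int) by push_cast; ring,
      PySem.List.pyGetD_natCast, PySem.List.pyGetD_natCast]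
    have ht : wl.tail[i]'(by simp; omega) = wl[i+1]'(by omega) := by
      simp [List.getElem_tail]
    rw [ht, List.getD_eq_getElem _ _ (by omega), List.getD_eq_getElem _ _ (by omega)]

theorem triple_seeds (wl : List String) :
    (PySem.List.pyRange 0 ((wl.length : Int) - 2) 1).map
        (fun i => PySem.List.pyGetD wl i "" ++ PySem.List.pyGetD wl (i+1) ""
          ++ PySem.List.pyGetD wl (i+2) "")
      = (((wl.zip wl.tail).zip (wl.drop 2)).map (fun p => p.1.1 ++ p.1.2 ++ p.2)) := by
  rw [PySem.List.pyRange_one]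
  apply List.ext_getElem
  · simp [List.length_zip]
    omega
  · intro i h1 h2
    have hi : i < wl.length - 2 := by
      simp at h1; omega
    simp only [List.getElem_map, List.getElem_zip, List.getElem_range]
    rw [show (0 : Int) + (i : Int) = ((i : Nat) : Int) by ring,
      show ((i : Nat) : Int) + 1 = (((i + 1 : Nat)) : Int) by push_cast; ring,
      show ((i : Nat) : Int) + 2 = (((i + 2 : Nat)) : Int) by push_cast; ring,
      PySem.List.pyGetD_natCast, PySem.List.pyGetD_natCast, PySem.List.pyGetD_natCast]
    have ht : wl.tail[i]'(by simp; omega) = wl[i+1]'(by omega) := by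
      simp [List.getElem_tail]
    have hd2 : (wl.drop 2)[i]'(by simp; omega) = wl[2+i]'(by omega) := by
      simp [List.getElem_drop]
    rw [ht, hd2, List.getD_eq_getElem _ _ (by omega), List.getD_eq_getElem _ _ (by omega),
      List.getD_eq_getElem _ _ (by omega)]
    congr 2
    omega

-- ===== VERDICT (by name: the statement is the Claim_ definition above) =====
theorem find_hierarchy_spec : Claim_equal_find_hierarchy := by
  intro wl wd _ hpre
  unfold Spec_find_hierarchy find_hierarchy find_hierarchy_alt
  simp only [climb_eq wd hpre.1]
  have hs2 : PySem.List.slice wl (some 2) none = wl.drop 2 := by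
    rw [show (2 : Int) = ((2 : Nat) : Int) by norm_num, PySem.List.slice_from_natCast]
  rw [PySem.List.slice_from_one, hs2, List.foldl_append, List.foldl_append]
  have h2 : ∀ init : List String,
      (PySem.List.pyRange 0 ((wl.length : Int) - 1) 1).foldl
        (fun acc i => climbB (buildParent wd) (wd.length + 2)
          (PySem.List.pyGetD wl i "" ++ PySem.List.pyGetD wl (i+1) "") acc) init
      = ((wl.zip wl.tail).map (fun p => p.1 ++ p.2)).foldl
        (fun acc w => climbB (buildParent wd) (wd.length + 2) w acc) init := by
    intro init
    rw [← pair_seeds wl]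
    exact (List.foldl_map
      (f := fun i : Int => PySem.List.pyGetD wl i "" ++ PySem.List.pyGetD wl (i+1) "")
      (g := fun acc w => climbB (buildParent wd) (wd.length + 2) w acc)).symm
  have h3 : ∀ init : List String,
      (PySem.List.pyRange 0 ((wl.length : Int) - 2) 1).foldl
        (fun acc i => climbB (buildParent wd) (wd.length + 2)
          (PySem.List.pyGetD wl i "" ++ PySem.List.pyGetD wl (i+1) ""
            ++ PySem.List.pyGetD wl (i+2) "") acc) init
      = (((wl.zip wl.tail).zip (wl.drop 2)).map (fun p => p.1.1 ++ p.1.2 ++ p.2)).foldl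
        (fun acc w => climbB (buildParent wd) (wd.length + 2) w acc) init := by
    intro init
    rw [← triple_seeds wl]
    exact (List.foldl_map
      (f := fun i : Int => PySem.List.pyGetD wl i "" ++ PySem.List.pyGetD wl (i+1) ""
        ++ PySem.List.pyGetD wl (i+2) "")
      (g := fun acc w => climbB (buildParent wd) (wd.length + 2) w acc)).symm
  rw [h2, h3]
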